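-- pv_equiv track=rewrite | github.com/harjassand/AGI-Stack-Unchained | CDEL-v2/cdel/v18_0/omega_noop_reason_v1.py | classify_noop_reason
-- ===== SOURCE A (Python) =====
-- from typing import Any
--
-- def classify_noop_reason(tie_break_path: Any) -> str:
--     rows: list[str] = []
--     if isinstance(tie_break_path, list):
--         rows = [str(row) for row in tie_break_path]
--     if any("RUNAWAY_BLOCKED" in row for row in rows):
--         return "RUNAWAY_BLOCKED"
--     if any("RUNAWAY_NO_CANDIDATE" in row for row in rows):
--         return "RUNAWAY_NO_CANDIDATE"
--     if any("COOLDOWN" in row for row in rows):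
--         return "COOLDOWN"
--     if any("BUDGET" in row for row in rows):
--         return "BUDGET"
--     if any(row.startswith("GOALS_COMPLETE") for row in rows):
--         return "GOALS_COMPLETE"
--     if any("NO_MATCH" in row for row in rows):
--         return "NO_MATCH"
--     return "OTHER"
-- ===== SOURCE B (Python) =====
-- PRIORITY = ["RUNAWAY_BLOCKED", "RUNAWAY_NO_CANDIDATE", "COOLDOWN", "BUDGET",
--             "GOALS_COMPLETE", "NO_MATCH"]
--
--
-- def _hit(marker, row):
--     # GOALS_COMPLETE is a prefix test; every other marker is a substring test.
--     if marker == "GOALS_COMPLETE":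
--         return row.startswith(marker)
--     return marker in row
--
--
-- def classify_noop_reason(tie_break_path):
--     found = set()
--     if isinstance(tie_break_path, list):
--         for row in tie_break_path:
--             row = str(row)
--             for marker in PRIORITY:
--                 if _hit(marker, row):
--                     found.add(marker)
--     for marker in PRIORITY:
--         if marker in found:
--             return marker
--     return "OTHER"
-- ===== Notes on version B (the rewrite author's own statement) =====
-- stated objective: alternative
-- what changed: B replaces A's six sequential any-scans over the rows with a single pass that records which markers occur in a set, then returns the first present marker from a fixed priority list.
import Mathlib
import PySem

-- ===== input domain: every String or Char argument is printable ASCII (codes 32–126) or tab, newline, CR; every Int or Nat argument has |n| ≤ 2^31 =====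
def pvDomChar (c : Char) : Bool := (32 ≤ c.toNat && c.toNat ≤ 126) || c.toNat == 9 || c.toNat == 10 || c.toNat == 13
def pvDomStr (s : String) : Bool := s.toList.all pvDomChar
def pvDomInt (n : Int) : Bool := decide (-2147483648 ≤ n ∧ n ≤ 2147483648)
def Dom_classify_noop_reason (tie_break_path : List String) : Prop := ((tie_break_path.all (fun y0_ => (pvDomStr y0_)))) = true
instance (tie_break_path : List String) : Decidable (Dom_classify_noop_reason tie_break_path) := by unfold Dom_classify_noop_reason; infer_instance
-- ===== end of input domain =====

-- B folds the rows once into a set of present markers and returns the first marker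
-- of the fixed priority list that is present; A rescans the rows per marker.
-- Equivalence is about the return value only (neither program mutates its argument).

-- ===== PORT A =====
-- The argument is a list of strings, so A's isinstance branch always runs and str(row) is row.
def classify_noop_reason (tie_break_path : List String) : String :=
  let rows := tie_break_path.map (fun row => row)
  if rows.any (fun row => PySem.Str.isIn "RUNAWAY_BLOCKED" row) then "RUNAWAY_BLOCKED"
  else if rows.any (fun row => PySem.Str.isIn "RUNAWAY_NO_CANDIDATE" row) then "RUNAWAY_NO_CANDIDATE"
  else if rows.any (fun row => PySem.Str.isIn "COOLDOWN" row) then "COOLDOWN"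
  else if rows.any (fun row => PySem.Str.isIn "BUDGET" row) then "BUDGET"
  else if rows.any (fun row => PySem.Str.startswith row "GOALS_COMPLETE") then "GOALS_COMPLETE"
  else if rows.any (fun row => PySem.Str.isIn "NO_MATCH" row) then "NO_MATCH"
  else "OTHER"

-- ===== PORT B =====
def pvPriority : List String :=
  ["RUNAWAY_BLOCKED", "RUNAWAY_NO_CANDIDATE", "COOLDOWN", "BUDGET", "GOALS_COMPLETE", "NO_MATCH"]

def pvHit (marker row : String) : Bool :=
  if marker == "GOALS_COMPLETE" then PySem.Str.startswith row marker
  else PySem.Str.isIn marker row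

def pvFound (tie_break_path : List String) : PySem.Set String :=
  tie_break_path.foldl
    (fun found row =>
      pvPriority.foldl (fun found marker =>
        if pvHit marker row then PySem.Set.add found marker else found) found)
    PySem.Set.empty

def classify_noop_reason_alt (tie_break_path : List String) : String :=
  let found := pvFound tie_break_path
  match pvPriority.find? (fun marker => PySem.Set.contains found marker) with
  | some marker => marker
  | none => "OTHER"

-- ===== PRECONDITION & SPEC =====
def Spec_classify_noop_reason (tie_break_path : List String) (out : String) : Prop := out = classify_noop_reason_alt tie_break_path
instance (tie_break_path : List String) (out : String) : Decidable (Spec_classify_noop_reason tie_break_path out) := by unfold Spec_classify_noop_reason; infer_instance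

-- ===== CLAIM (what is proved, stated in full; the proofs are below) =====
def Claim_equal_classify_noop_reason : Prop := ∀ (tie_break_path : List String), Dom_classify_noop_reason tie_break_path → Spec_classify_noop_reason tie_break_path (classify_noop_reason tie_break_path)

-- ===== LEMMAS AND PROOFS =====

-- inner fold over a marker list: membership in the accumulator
theorem mem_inner_fold (L : List String) (s : PySem.Set String) (row m : String) :
    m ∈ L.foldl (fun found marker =>
        if pvHit marker row then PySem.Set.add found marker else found) s ↔
      m ∈ s ∨ (m ∈ L ∧ pvHit m row = true) := by
  induction L generalizing s with
  | nil => simp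
  | cons h t ih =>
    simp only [List.foldl_cons, ih]
    by_cases hh : pvHit h row = true
    · simp [hh, PySem.Set.mem_add]
      constructor
      · rintro (⟨hs | he⟩ | ht)
        · exact Or.inl hs
        · exact Or.inr ⟨Or.inl he, he ▸ hh⟩
        · exact Or.inr ⟨Or.inr ht.1, ht.2⟩
      · rintro (hs | ⟨(he | ht), hm⟩)
        · exact Or.inl (Or.inl hs)
        · exact Or.inl (Or.inr he)
        · exact Or.inr ⟨ht, hm⟩
    · simp only [hh]
      constructor
      · rintro (hs | ht)
        · exact Or.inl hs
        · exact Or.inr ⟨List.mem_cons_of_mem _ ht.1, ht.2⟩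
      · rintro (hs | ⟨hm, hhit⟩)
        · exact Or.inl hs
        · rcases List.mem_cons.mp hm with he | ht
          · exact absurd (he ▸ hhit) hh
          · exact Or.inr ⟨ht, hhit⟩

theorem mem_pvFound_aux (rows : List String) (s : PySem.Set String) (m : String) :
    m ∈ rows.foldl
        (fun found row =>
          pvPriority.foldl (fun found marker =>
            if pvHit marker row then PySem.Set.add found marker else found) found) s ↔
      m ∈ s ∨ (m ∈ pvPriority ∧ rows.any (pvHit m) = true) := by
  induction rows generalizing s with
  | nil => simp
  | cons r t ih =>
    simp only [List.foldl_cons, ih, mem_inner_fold, List.any_cons, Bool.or_eq_true]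
    tauto

theorem contains_pvFound (rows : List String) (m : String) (hm : m ∈ pvPriority) :
    PySem.Set.contains (pvFound rows) m = rows.any (pvHit m) := by
  rcases h : rows.any (pvHit m) with _ | _
  · simp only [PySem.Set.contains_eq_listContains, List.contains_eq_mem, decide_eq_false_iff_not]
    rw [pvFound, mem_pvFound_aux]
    simp [PySem.Set.empty, h]
  · simp only [PySem.Set.contains_eq_listContains, List.contains_eq_mem, decide_eq_true_eq]
    rw [pvFound, mem_pvFound_aux]
    exact Or.inr ⟨hm, h⟩

-- ===== VERDICT (by name: the statement is the Claim_ definition above) =====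
theorem classify_noop_reason_spec : Claim_equal_classify_noop_reason := by
  intro rows _
  unfold Spec_classify_noop_reason classify_noop_reason classify_noop_reason_alt
  simp only [List.map_id', pvPriority, List.find?_cons, List.find?_nil]
  rw [contains_pvFound rows "RUNAWAY_BLOCKED" (by decide),
      contains_pvFound rows "RUNAWAY_NO_CANDIDATE" (by decide),
      contains_pvFound rows "COOLDOWN" (by decide),
      contains_pvFound rows "BUDGET" (by decide),
      contains_pvFound rows "GOALS_COMPLETE" (by decide),
      contains_pvFound rows "NO_MATCH" (by decide)]
  have e1 : pvHit "RUNAWAY_BLOCKED" = fun row => PySem.Str.isIn "RUNAWAY_BLOCKED" row := by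
    funext r; simp [pvHit]
  have e2 : pvHit "RUNAWAY_NO_CANDIDATE" = fun row => PySem.Str.isIn "RUNAWAY_NO_CANDIDATE" row := by
    funext r; simp [pvHit]
  have e3 : pvHit "COOLDOWN" = fun row => PySem.Str.isIn "COOLDOWN" row := by
    funext r; simp [pvHit]
  have e4 : pvHit "BUDGET" = fun row => PySem.Str.isIn "BUDGET" row := by
    funext r; simp [pvHit]
  have e5 : pvHit "GOALS_COMPLETE" = fun row => PySem.Str.startswith row "GOALS_COMPLETE" := by
    funext r; simp [pvHit]
  have e6 : pvHit "NO_MATCH" = fun row => PySem.Str.isIn "NO_MATCH" row := by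
    funext r; simp [pvHit]
  rw [e1, e2, e3, e4, e5, e6]
  rcases rows.any (fun row => PySem.Str.isIn "RUNAWAY_BLOCKED" row) <;>
  rcases rows.any (fun row => PySem.Str.isIn "RUNAWAY_NO_CANDIDATE" row) <;>
  rcases rows.any (fun row => PySem.Str.isIn "COOLDOWN" row) <;>
  rcases rows.any (fun row => PySem.Str.isIn "BUDGET" row) <;>
  rcases rows.any (fun row => PySem.Str.startswith row "GOALS_COMPLETE") <;>
  rcases rows.any (fun row => PySem.Str.isIn "NO_MATCH" row) <;> rfl
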